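-- pv_equiv track=rewrite | github.com/robkeim/random | EverybodyCodes/2024/quest07.py | execute_plan_part3
-- ===== SOURCE A (Python) =====
-- def execute_plan_part3(track, plan):
--     total_power = 0
--     cur_power = 10
--
--     for i in range(2024 * len(track)):
--         track_value = track[i % len(track)]
--
--         if track_value == "+":
--             cur_power += 1
--         elif track_value == "-":
--             cur_power -= 1
--         else:
--             value = plan[i % len(plan)]
--
--             if value == "+":
--                 cur_power += 1
--             elif value == "-":
--                 cur_power -= 1
--
--         total_power += cur_power
--
--     return total_power
-- ===== SOURCE B (Python) =====
-- from math import gcd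
--
-- def execute_plan_part3(track, plan):
--     lt = len(track)
--     if lt == 0:
--         return 0
--     n = 2024 * lt
--     if all(c in "+-" for c in track):
--         period = lt
--     else:
--         period = lt * len(plan) // gcd(lt, len(plan))
--
--     def delta(i):
--         c = track[i % lt]
--         if c == "+":
--             return 1
--         if c == "-":
--             return -1
--         p = plan[i % len(plan)]
--         if p == "+":
--             return 1
--         if p == "-":
--             return -1
--         return 0
--
--     # prefix sums over one period: pre[j] = sum of deltas of steps 0..j-1
--     pre = [0]
--     for j in range(period):
--         pre.append(pre[-1] + delta(j))
--     P = pre[-1]                 # power change over one full period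
--     C = sum(pre[1:])            # sum of power offsets within one period
--     q, r = divmod(n, period)
--     total = q * (10 * period + C) + P * period * (q * (q - 1) // 2)
--     total += sum(10 + q * P + pre[j + 1] for j in range(r))
--     return total
-- ===== Notes on version B (the rewrite author's own statement) =====
-- stated objective: faster
-- what changed: A simulates all 2024*len(track) steps one by one; B builds prefix sums of the per-step power deltas over a single period (len(track), or lcm(len(track),len(plan)) when the plan is consulted) and sums the full periods with an arithmetic-series closed form, adding the remainder from the prefix table.
import Mathlib
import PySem

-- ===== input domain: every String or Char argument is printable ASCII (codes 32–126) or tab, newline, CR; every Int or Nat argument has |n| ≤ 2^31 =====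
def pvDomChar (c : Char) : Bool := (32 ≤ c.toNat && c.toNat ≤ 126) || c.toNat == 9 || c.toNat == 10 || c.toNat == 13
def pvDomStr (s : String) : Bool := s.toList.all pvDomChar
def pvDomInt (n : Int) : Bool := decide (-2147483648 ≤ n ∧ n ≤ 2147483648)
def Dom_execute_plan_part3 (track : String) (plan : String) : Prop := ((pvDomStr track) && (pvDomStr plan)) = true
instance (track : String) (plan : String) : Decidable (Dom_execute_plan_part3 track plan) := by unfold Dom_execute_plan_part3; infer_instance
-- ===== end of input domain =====

-- B replaces A's loop over 2024*len(track) steps by prefix sums over one period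
-- (len(track) or lcm(len(track),len(plan))) plus a closed form for the full periods.

-- ===== PORT A =====
-- loop body of A: one step of the for-loop (state = (total_power, cur_power))
def pvStepA (t p : List Char) (st : Int × Int) (i : Int) : Int × Int :=
  let total := st.1
  let cur := st.2
  let tv := PySem.List.pyGetD t (PySem.Int.mod i (t.length : Int)) ' '
  let cur :=
    if tv = '+' then cur + 1
    else if tv = '-' then cur - 1
    else
      let v := PySem.List.pyGetD p (PySem.Int.mod i (p.length : Int)) ' '
      if v = '+' then cur + 1
      else if v = '-' then cur - 1
      else cur
  (total + cur, cur)

def execute_plan_part3 (track : String) (plan : String) : Int :=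
  ((PySem.List.pyRange 0 (2024 * (track.toList.length : Int)) 1).foldl
    (pvStepA track.toList plan.toList) (0, 10)).1

-- ===== PORT B =====
-- Source B's delta(i): power change at step i (all indices are nonnegative ints, so Nat % = Python %)
def pvDelta (t p : List Char) (j : Nat) : Int :=
  let c := t.getD (j % t.length) ' '
  if c = '+' then 1
  else if c = '-' then -1
  else
    let v := p.getD (j % p.length) ' '
    if v = '+' then 1
    else if v = '-' then -1
    else 0

-- all arithmetic in Source B is on nonnegative ints, so Nat /, %, gcd are exact here
def execute_plan_part3_alt (track : String) (plan : String) : Int :=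
  let t := track.toList
  let p := plan.toList
  let lt := t.length
  if lt = 0 then 0
  else
    let n := 2024 * lt
    let period := if t.all (fun c => c == '+' || c == '-') then lt
      else lt * p.length / Nat.gcd lt p.length
    let pre := (List.range period).foldl
      (fun pre j => pre ++ [pre.getLastD 0 + pvDelta t p j]) ([0] : List Int)
    let P := pre.getLastD 0
    let C := (pre.drop 1).sum
    let q := n / period
    let r := n % period
    (q : Int) * (10 * (period : Int) + C)
      + P * (period : Int) * ((q * (q - 1) / 2 : Nat) : Int)
      + ((List.range r).map (fun j => 10 + (q : Int) * P + pre.getD (j + 1) 0)).sum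

-- ===== PRECONDITION & SPEC =====
-- Pre_ excludes exactly the inputs where both programs raise ZeroDivisionError: a nonempty
-- track containing a character other than '+'/'-' together with an empty plan
-- (A evaluates plan[i % len(plan)] with len(plan) = 0; B divides by gcd-derived period 0).
def Pre_execute_plan_part3 (track : String) (plan : String) : Prop :=
  plan.toList = [] → ∀ c ∈ track.toList, c = '+' ∨ c = '-'
instance (track : String) (plan : String) : Decidable (Pre_execute_plan_part3 track plan) := by
  unfold Pre_execute_plan_part3; infer_instance

def pvWitness_execute_plan_part3 : String × String := ("+=-", "+-")

def Spec_execute_plan_part3 (track : String) (plan : String) (out : Int) : Prop := out = execute_plan_part3_alt track plan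
instance (track : String) (plan : String) (out : Int) : Decidable (Spec_execute_plan_part3 track plan out) := by unfold Spec_execute_plan_part3; infer_instance

-- ===== CLAIM (what is proved, stated in full; the proofs are below) =====
def Claim_equal_execute_plan_part3 : Prop := ∀ (track : String) (plan : String), Dom_execute_plan_part3 track plan → Pre_execute_plan_part3 track plan → Spec_execute_plan_part3 track plan (execute_plan_part3 track plan)

-- ===== LEMMAS AND PROOFS =====

-- S n = cur_power - 10 after n steps; T n = total_power after n steps
def pvS (t p : List Char) (n : Nat) : Int := ((List.range n).map (pvDelta t p)).sum
def pvT (t p : List Char) (n : Nat) : Int := ((List.range n).map (fun i => 10 + pvS t p (i + 1))).sum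

theorem pvS_succ (t p : List Char) (n : Nat) :
    pvS t p (n + 1) = pvS t p n + pvDelta t p n := by
  simp [pvS, List.range_succ]

theorem pre_char (t p : List Char) (m : Nat) :
    (List.range m).foldl (fun pre j => pre ++ [pre.getLastD 0 + pvDelta t p j]) ([0] : List Int)
      = (List.range (m + 1)).map (pvS t p) := by
  induction m with
  | zero => simp [pvS]
  | succ m ih =>
    rw [List.range_succ, List.foldl_append, ih, List.range_succ (n := m + 1)]
    simp [pvS_succ, List.range_succ]

theorem delta_shift (t p : List Char) (ht : t ≠ []) (per : Nat)
    (h1 : t.length ∣ per) (h2 : p.length ∣ per ∨ ∀ c ∈ t, c = '+' ∨ c = '-') (j : Nat) :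
    pvDelta t p (j + per) = pvDelta t p j := by
  obtain ⟨k, hk⟩ := h1
  have hmt : (j + per) % t.length = j % t.length := by
    rw [hk]; exact Nat.add_mul_mod_self_left j t.length k
  unfold pvDelta
  rw [hmt]
  have hlt : j % t.length < t.length := Nat.mod_lt _ (List.length_pos_iff.mpr ht)
  rcases h2 with hdvd | hall
  · obtain ⟨k', hk'⟩ := hdvd
    rw [hk', Nat.add_mul_mod_self_left]
  · have hmem : t.getD (j % t.length) ' ' ∈ t := by
      rw [List.getD_eq_getElem t ' ' hlt]; exact List.getElem_mem hlt
    rcases hall _ hmem with h | h <;>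
      · simp only [List.getD_eq_getElem?_getD] at h
        simp [h]

theorem S_shift (t p : List Char) (ht : t ≠ []) (per : Nat)
    (h1 : t.length ∣ per) (h2 : p.length ∣ per ∨ ∀ c ∈ t, c = '+' ∨ c = '-') (a : Nat) :
    pvS t p (a + per) = pvS t p a + pvS t p per := by
  induction a with
  | zero => simp [pvS]
  | succ a ih =>
    have : a + 1 + per = (a + per) + 1 := by omega
    rw [this, pvS_succ, ih, delta_shift t p ht per h1 h2, pvS_succ]
    ring

theorem S_mul (t p : List Char) (ht : t ≠ []) (per : Nat)
    (h1 : t.length ∣ per) (h2 : p.length ∣ per ∨ ∀ c ∈ t, c = '+' ∨ c = '-') (k a : Nat) :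
    pvS t p (k * per + a) = k * pvS t p per + pvS t p a := by
  induction k with
  | zero => simp
  | succ k ih =>
    have : (k + 1) * per + a = (k * per + a) + per := by ring
    rw [this, S_shift t p ht per h1 h2, ih]
    push_cast
    ring

theorem pvT_succ (t p : List Char) (n : Nat) :
    pvT t p (n + 1) = pvT t p n + (10 + pvS t p (n + 1)) := by
  simp [pvT, List.range_succ]

-- A's step adds pvDelta to cur_power
theorem stepA_eq (t p : List Char) (ht : t ≠ [])
    (hp : p ≠ [] ∨ ∀ c ∈ t, c = '+' ∨ c = '-') (tot cur : Int) (k : Nat) :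
    pvStepA t p (tot, cur) (k : Int) = (tot + (cur + pvDelta t p k), cur + pvDelta t p k) := by
  have hlt : k % t.length < t.length := Nat.mod_lt _ (List.length_pos_iff.mpr ht)
  unfold pvStepA pvDelta
  have hmt : PySem.List.pyGetD t (PySem.Int.mod (k : Int) (t.length : Int)) ' '
      = t.getD (k % t.length) ' ' := by
    rw [PySem.Int.mod_natCast, PySem.List.pyGetD_natCast]
  rw [hmt]
  by_cases hplus : t.getD (k % t.length) ' ' = '+'
  · simp only [List.getD_eq_getElem?_getD] at hplus
    simp [hplus]
  · by_cases hminus : t.getD (k % t.length) ' ' = '-'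
    · simp only [List.getD_eq_getElem?_getD] at hminus
      simp [hminus, sub_eq_add_neg]
    · have hpne : p ≠ [] := by
        rcases hp with h | hall
        · exact h
        · exfalso
          have hmem : t.getD (k % t.length) ' ' ∈ t := by
            rw [List.getD_eq_getElem t ' ' hlt]; exact List.getElem_mem hlt
          rcases hall _ hmem with h | h
          · exact hplus h
          · exact hminus h
      have hmp : PySem.List.pyGetD p (PySem.Int.mod (k : Int) (p.length : Int)) ' '
          = p.getD (k % p.length) ' ' := by
        rw [PySem.Int.mod_natCast, PySem.List.pyGetD_natCast]
      rw [hmp]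
      simp only [List.getD_eq_getElem?_getD] at hplus hminus
      simp only [hplus, hminus, if_false, List.getD_eq_getElem?_getD]
      by_cases h1 : p[k % p.length]?.getD ' ' = '+'
      · simp [h1]
      · by_cases h2 : p[k % p.length]?.getD ' ' = '-'
        · simp [h2, sub_eq_add_neg]
        · simp [h1, h2]

theorem foldA (t p : List Char) (ht : t ≠ [])
    (hp : p ≠ [] ∨ ∀ c ∈ t, c = '+' ∨ c = '-') (n : Nat) :
    (List.range n).foldl (fun (st : Int × Int) (k : Nat) => pvStepA t p st (k : Int)) (0, 10)
      = (pvT t p n, 10 + pvS t p n) := by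
  induction n with
  | zero => simp [pvT, pvS]
  | succ n ih =>
    rw [List.range_succ, List.foldl_append, ih]
    simp only [List.foldl_cons, List.foldl_nil]
    rw [stepA_eq t p ht hp _ _ n, pvT_succ, pvS_succ]
    simp [add_assoc]

theorem pvT_add (t p : List Char) (a b : Nat) :
    pvT t p (a + b) = pvT t p a + ∑ j ∈ Finset.range b, (10 + pvS t p (a + j + 1)) := by
  induction b with
  | zero => simp
  | succ b ih =>
    rw [show a + (b + 1) = (a + b) + 1 from rfl, pvT_succ, ih, Finset.sum_range_succ]
    ring

theorem T_blocks (t p : List Char) (ht : t ≠ []) (per : Nat)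
    (h1 : t.length ∣ per) (h2 : p.length ∣ per ∨ ∀ c ∈ t, c = '+' ∨ c = '-') (q : Nat) :
    pvT t p (q * per)
      = ∑ k ∈ Finset.range q,
          (10 * (per : Int) + pvS t p per * (per : Int) * (k : Int)
            + ∑ j ∈ Finset.range per, pvS t p (j + 1)) := by
  induction q with
  | zero => simp [pvT]
  | succ q ih =>
    rw [show (q + 1) * per = q * per + per by ring, pvT_add, ih, Finset.sum_range_succ]
    congr 1
    have hS : ∀ j, pvS t p (q * per + j + 1) = (q : Int) * pvS t p per + pvS t p (j + 1) := by
      intro j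
      rw [show q * per + j + 1 = q * per + (j + 1) from rfl, S_mul t p ht per h1 h2]
    calc ∑ j ∈ Finset.range per, (10 + pvS t p (q * per + j + 1))
        = ∑ j ∈ Finset.range per, (10 + ((q : Int) * pvS t p per + pvS t p (j + 1))) := by
          apply Finset.sum_congr rfl; intro j _; rw [hS]
      _ = 10 * (per : Int) + pvS t p per * (per : Int) * (q : Int)
            + ∑ j ∈ Finset.range per, pvS t p (j + 1) := by
          rw [Finset.sum_add_distrib, Finset.sum_add_distrib, Finset.sum_const, Finset.sum_const,
            Finset.card_range]
          ring

theorem main_split (t p : List Char) (ht : t ≠ []) (per : Nat)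
    (h1 : t.length ∣ per) (h2 : p.length ∣ per ∨ ∀ c ∈ t, c = '+' ∨ c = '-') (n : Nat) :
    pvT t p n
      = ((n / per : Nat) : Int) * (10 * (per : Int) + ∑ j ∈ Finset.range per, pvS t p (j + 1))
        + pvS t p per * (per : Int) * (((n / per) * ((n / per) - 1) / 2 : Nat) : Int)
        + ∑ j ∈ Finset.range (n % per),
            (10 + ((n / per : Nat) : Int) * pvS t p per + pvS t p (j + 1)) := by
  set q := n / per with hqdef
  set r := n % per with hrdef
  have hn : n = q * per + r := by
    rw [hqdef, hrdef, Nat.mul_comm]; exact (Nat.div_add_mod n per).symm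
  have hgauss : ((q * (q - 1) / 2 : Nat) : Int) = ∑ k ∈ Finset.range q, (k : Int) := by
    rw [← Finset.sum_range_id]
    push_cast
    rfl
  rw [hn, pvT_add, T_blocks t p ht per h1 h2, hgauss]
  have hS : ∀ j, pvS t p (q * per + j + 1) = (q : Int) * pvS t p per + pvS t p (j + 1) := by
    intro j
    rw [show q * per + j + 1 = q * per + (j + 1) from rfl, S_mul t p ht per h1 h2]
  have hsum1 : ∑ k ∈ Finset.range q,
      (10 * (per : Int) + pvS t p per * (per : Int) * (k : Int)
        + ∑ j ∈ Finset.range per, pvS t p (j + 1))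
      = (q : Int) * (10 * (per : Int) + ∑ j ∈ Finset.range per, pvS t p (j + 1))
        + pvS t p per * (per : Int) * ∑ k ∈ Finset.range q, (k : Int) := by
    rw [Finset.sum_add_distrib, Finset.sum_add_distrib, Finset.sum_const, Finset.sum_const,
      Finset.card_range, ← Finset.mul_sum]
    ring
  rw [hsum1]
  congr 1
  apply Finset.sum_congr rfl
  intro j _
  rw [hS j]
  ring

theorem list_sum_range (f : Nat → Int) (n : Nat) :
    ((List.range n).map f).sum = ∑ i ∈ Finset.range n, f i := rfl

theorem final (track plan : String)
    (hpre : plan.toList = [] → ∀ c ∈ track.toList, c = '+' ∨ c = '-') :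
    execute_plan_part3 track plan = execute_plan_part3_alt track plan := by
  set t := track.toList with htdef
  set p := plan.toList with hpdef
  by_cases h0 : t.length = 0
  · have ht : t = [] := List.length_eq_zero_iff.mp h0
    unfold execute_plan_part3 execute_plan_part3_alt
    rw [← htdef, ← hpdef, ht]
    simp [PySem.List.pyRange_one_eq_nil]
  · have ht : t ≠ [] := fun h => h0 (by rw [h]; rfl)
    have hp : p ≠ [] ∨ ∀ c ∈ t, c = '+' ∨ c = '-' := by
      by_cases hpe : p = []
      · exact Or.inr (hpre hpe)
      · exact Or.inl hpe
    -- the period and its properties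
    set per := if t.all (fun c => c == '+' || c == '-') then t.length
      else t.length * p.length / Nat.gcd t.length p.length with hperdef
    have hdvd1 : t.length ∣ per := by
      rw [hperdef]
      split
      · exact dvd_refl _
      · exact Nat.dvd_lcm_left _ _
    have hdvd2 : p.length ∣ per ∨ ∀ c ∈ t, c = '+' ∨ c = '-' := by
      rw [hperdef]
      split
      · rename_i hall
        right
        intro c hc
        have := List.all_eq_true.mp hall c hc
        simp only [Bool.or_eq_true, beq_iff_eq] at this
        exact this
      · left
        exact Nat.dvd_lcm_right _ _
    have hppos : per > 0 := by
      rw [hperdef]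
      split
      · omega
      · rename_i hall
        have hpne : p ≠ [] := by
          rcases hp with h | h
          · exact h
          · exfalso; apply hall
            apply List.all_eq_true.mpr
            intro c hc
            rcases h c hc with h' | h' <;> simp [h']
        have : Nat.lcm t.length p.length ≠ 0 :=
          Nat.lcm_ne_zero h0 (fun h => hpne (List.length_eq_zero_iff.mp h))
        exact Nat.pos_of_ne_zero this
    -- A's side
    have hA : execute_plan_part3 track plan = pvT t p (2024 * t.length) := by
      unfold execute_plan_part3
      rw [← htdef, ← hpdef]
      rw [PySem.List.pyRange_one, List.foldl_map]
      have : ((2024 * (t.length : Int)) - 0).toNat = 2024 * t.length := by omega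
      rw [this]
      have : ∀ (st : Int × Int) (k : Nat), pvStepA t p st (0 + (k : Nat)) = pvStepA t p st (k : Nat) := by
        intro st k; rw [zero_add]
      simp only [this]
      rw [foldA t p ht hp]
    -- B's side
    have hB : execute_plan_part3_alt track plan
        = ((2024 * t.length) / per : Nat)
            * (10 * (per : Int) + ∑ j ∈ Finset.range per, pvS t p (j + 1))
          + pvS t p per * (per : Int)
            * ((((2024 * t.length) / per) * (((2024 * t.length) / per) - 1) / 2 : Nat) : Int)
          + ∑ j ∈ Finset.range ((2024 * t.length) % per),
              (10 + (((2024 * t.length) / per : Nat) : Int) * pvS t p per + pvS t p (j + 1)) := by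
      unfold execute_plan_part3_alt
      rw [← htdef, ← hpdef]
      dsimp only
      rw [if_neg h0, ← hperdef, pre_char]
      have hlast : ((List.range (per + 1)).map (pvS t p)).getLastD 0 = pvS t p per := by
        rw [List.range_succ, List.map_append]
        exact List.getLastD_concat
      have hdrop : ((List.range (per + 1)).map (pvS t p)).drop 1
          = (List.range per).map (fun j => pvS t p (j + 1)) := by
        rw [List.range_succ_eq_map]
        simp [Function.comp_def, Nat.succ_eq_add_one, List.map_map]
      rw [hlast, hdrop, list_sum_range]
      have hr : (2024 * t.length) % per < per := Nat.mod_lt _ hppos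
      have hmapsum : ((List.range ((2024 * t.length) % per)).map
            (fun j => 10 + (((2024 * t.length) / per : Nat) : Int) * pvS t p per
              + ((List.range (per + 1)).map (pvS t p)).getD (j + 1) 0)).sum
          = ∑ j ∈ Finset.range ((2024 * t.length) % per),
              (10 + (((2024 * t.length) / per : Nat) : Int) * pvS t p per + pvS t p (j + 1)) := by
        rw [list_sum_range]
        apply Finset.sum_congr rfl
        intro j hj
        have hj' : j + 1 < per + 1 := by
          have := Finset.mem_range.mp hj; omega
        rw [PySem.List.getD_map_range (pvS t p) (per + 1) (j + 1) 0 hj']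
      rw [hmapsum]
    rw [hA, hB]
    exact main_split t p ht per hdvd1 hdvd2 (2024 * t.length)


-- ===== VERDICT (by name: the statement is the Claim_ definition above) =====
theorem execute_plan_part3_spec : Claim_equal_execute_plan_part3 := by
  intro track plan _ hpre
  unfold Pre_execute_plan_part3 at hpre
  unfold Spec_execute_plan_part3
  exact final track plan hpre
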